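-- pv_equiv track=rewrite | github.com/neuroforgede/docker-stack-deploy | docker_stack_deploy/cli/deployer.py | find_all_stack_files
-- ===== SOURCE A (Python) =====
-- from typing import Dict, Any, Tuple, List, Literal
--
-- def find_all_stack_files(argv: List[str]) -> List[Tuple[int, str]]:
--     ret: List[Tuple[int, str]] = []
--
--     found_c = False
--
--     for index, value in zip(range(0, len(argv)), argv):
--         if value == "-c" or value == "--compose-file":
--             found_c = True
--             continue
--         if found_c:
--             ret.append((index, value))
--             found_c = False
--
--     return ret
-- ===== SOURCE B (Python) =====
-- from typing import List, Tuple
--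
-- FLAGS = ("-c", "--compose-file")
--
-- def find_all_stack_files(argv: List[str]) -> List[Tuple[int, str]]:
--     # stateless lookback: a value belongs to -c/--compose-file iff the previous
--     # token is a flag and the value itself is not a flag
--     return [
--         (i + 1, cur)
--         for i, (prev, cur) in enumerate(zip(argv, argv[1:]))
--         if prev in FLAGS and cur not in FLAGS
--     ]
-- ===== Notes on version B (the rewrite author's own statement) =====
-- stated objective: simpler
-- what changed: Replaces the mutable found_c state machine with a stateless single list comprehension over adjacent (prev, cur) pairs: keep (i, argv[i]) exactly when argv[i-1] is a flag and argv[i] is not.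
import Mathlib
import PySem

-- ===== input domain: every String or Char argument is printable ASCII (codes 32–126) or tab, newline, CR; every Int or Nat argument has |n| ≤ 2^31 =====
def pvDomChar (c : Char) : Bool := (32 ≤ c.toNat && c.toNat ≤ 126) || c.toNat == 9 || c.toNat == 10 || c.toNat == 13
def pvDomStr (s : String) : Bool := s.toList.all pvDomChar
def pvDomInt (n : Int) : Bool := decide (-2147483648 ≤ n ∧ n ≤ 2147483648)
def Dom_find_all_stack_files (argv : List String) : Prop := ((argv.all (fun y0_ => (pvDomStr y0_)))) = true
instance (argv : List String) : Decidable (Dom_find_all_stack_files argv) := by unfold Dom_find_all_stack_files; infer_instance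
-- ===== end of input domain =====

-- B replaces A's running found_c flag with a stateless lookback comprehension over adjacent pairs (objective: simpler).

-- ===== PORT A =====
-- for index, value in zip(range(0, len(argv)), argv): state = (ret, found_c)
def find_all_stack_files (argv : List String) : List (Int × String) :=
  ((PySem.List.enumerate argv 0).foldl
    (fun (st : List (Int × String) × Bool) p =>
      if p.2 == "-c" || p.2 == "--compose-file" then (st.1, true)
      else if st.2 then (st.1 ++ [p], false) else st)
    ([], false)).1

-- ===== PORT B =====
def pvIsFlag (s : String) : Bool := s == "-c" || s == "--compose-file"

-- [(i+1, cur) for i, (prev, cur) in enumerate(zip(argv, argv[1:])) if prev in FLAGS and cur not in FLAGS]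
def find_all_stack_files_alt (argv : List String) : List (Int × String) :=
  (PySem.List.enumerate (argv.zip (argv.drop 1)) 0).filterMap
    (fun p => if pvIsFlag p.2.1 && !pvIsFlag p.2.2 then some (p.1 + 1, p.2.2) else none)

-- ===== PRECONDITION & SPEC =====
def Spec_find_all_stack_files (argv : List String) (out : List (Int × String)) : Prop := out = find_all_stack_files_alt argv
instance (argv : List String) (out : List (Int × String)) : Decidable (Spec_find_all_stack_files argv out) := by unfold Spec_find_all_stack_files; infer_instance

-- ===== CLAIM (what is proved, stated in full; the proofs are below) =====
def Claim_equal_find_all_stack_files : Prop := ∀ (argv : List String), Dom_find_all_stack_files argv → Spec_find_all_stack_files argv (find_all_stack_files argv)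

-- ===== LEMMAS AND PROOFS =====

-- common recursive characterisation: result from position s onward given the incoming flag state f
def pvRec (f : Bool) (s : Int) : List String → List (Int × String)
  | [] => []
  | x :: xs =>
      if pvIsFlag x then pvRec true (s + 1) xs
      else if f then (s, x) :: pvRec false (s + 1) xs
      else pvRec false (s + 1) xs

theorem pvA_fold (xs : List String) : ∀ (s : Int) (st : List (Int × String) × Bool),
    ((PySem.List.enumerate xs s).foldl
      (fun (st : List (Int × String) × Bool) p =>
        if p.2 == "-c" || p.2 == "--compose-file" then (st.1, true)
        else if st.2 then (st.1 ++ [p], false) else st)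
      st).1 = st.1 ++ pvRec st.2 s xs := by
  induction xs with
  | nil => intro s st; simp [PySem.List.enumerate_nil, pvRec]
  | cons x xs ih =>
      intro s st
      obtain ⟨acc, f⟩ := st
      rw [PySem.List.enumerate_cons, List.foldl_cons, ih]
      by_cases hx : pvIsFlag x = true
      · have hx' : (x == "-c" || x == "--compose-file") = true := hx
        simp [hx', pvRec, hx]
      · have hx' : (x == "-c" || x == "--compose-file") = false := by
          simpa [pvIsFlag] using hx
        simp only [Bool.not_eq_true] at hx
        cases f <;> simp [hx', pvRec, hx]

theorem pvB_look (xs : List String) : ∀ (x : String) (s : Int),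
    (PySem.List.enumerate ((x :: xs).zip xs) s).filterMap
      (fun p => if pvIsFlag p.2.1 && !pvIsFlag p.2.2 then some (p.1 + 1, p.2.2) else none)
      = pvRec (pvIsFlag x) (s + 1) xs := by
  induction xs with
  | nil => intro x s; simp [PySem.List.enumerate_nil, pvRec]
  | cons c r ih =>
      intro x s
      simp only [List.zip_cons_cons, PySem.List.enumerate_cons, List.filterMap_cons, ih, pvRec]
      by_cases hc : pvIsFlag c = true
      · simp [hc]
      · simp only [Bool.not_eq_true] at hc
        by_cases hx : pvIsFlag x = true
        · simp [hc, hx]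
        · simp only [Bool.not_eq_true] at hx
          simp [hc, hx]

-- ===== VERDICT (by name: the statement is the Claim_ definition above) =====
theorem find_all_stack_files_spec : Claim_equal_find_all_stack_files := by
  intro argv _
  unfold Spec_find_all_stack_files find_all_stack_files find_all_stack_files_alt
  cases argv with
  | nil => simp [PySem.List.enumerate_nil]
  | cons x xs =>
      rw [PySem.List.enumerate_cons, List.foldl_cons, pvA_fold,
        List.drop_one, List.tail_cons, pvB_look xs x 0]
      by_cases hx : pvIsFlag x = true
      · have hx' : (x == "-c" || x == "--compose-file") = true := hx
        simp [hx', hx]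
      · have hx' : (x == "-c" || x == "--compose-file") = false := by
          simpa [pvIsFlag] using hx
        simp only [Bool.not_eq_true] at hx
        simp [hx', hx]
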